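-- pv_equiv track=rewrite | github.com/StenoHarri/steno-layout-evolution-with-a-genetic-algorithm | pronunciation_frequency_generator.py | remove_vowels_but_keep_main
-- ===== SOURCE A (Python) =====
-- def remove_vowels_but_keep_main(pron):
--     """
--     Remove vowels unless they are initial, final, or stressed
--     """
--
--     # Expand ERx → AHx R, so for a rhotic accent the R is preseved when the vowel is dropped.
--     # R coloured vowels can't simply be dropped as that includes dropping the consonant R, so I'm adding the consonant explicityly
--     pron = pron.replace("ER0", "AH0 R").replace("ER1", "AH1 R").replace("ER2", "AH2 R")
--
--     # WSI vowels treat UH and UW the same. OW and OW have already been merged in CMU, don't know why, but I would have merged them for WSI compatability anyway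
--     # pron = pron.replace("UH", "UW")
--     # On second thoughts, it's treated differently, like PWURB -> bush, PWAOBG -> book. It just doen't get a dedicated chord
--
--     # WSI vowels treat Y UW the same as UW
--     pron = pron.replace("Y UW", "UW").replace("Y UH", "UH")
--
--
--     phones = pron.split()
--
--     vowels = {"AA", "AE", "AH", "AO", "AW", "AY",
--               "EH", "ER", "EY", "IH", "IY",
--               "OW", "OY", "UH", "UW"}
--
--     def is_vowel(phone):
--         return any(phone.startswith(v) for v in vowels)
--
--     def insert_vowel_separator(phones, i):
--         """
--         In English, vowels cannot neighbour, in steno this is useful for dropping a vowel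
--         cooperate -> coe wo pe rate -> cwop rate
--         However, the CMU thinks the pronunciation is coe o pe rate
--         """
--         if not i > 0:
--             return False
--
--         starting_ph = phones[i - 1]
--         following_ph = phones[i]
--
--         if not (is_vowel(starting_ph) and is_vowel(following_ph)):
--             return False
--
--         if starting_ph[0:2] in {"IY", "EY", "AE"}:
--             # Insert a 'Y' between these vowels
--             phones.insert(i, "Y")
--             return True
--         elif starting_ph[0:2] in {"AA", "AO", "OW", "UW", "AH", "UH"}:
--             # Insert a 'W' between these vowels
--             phones.insert(i, "W")
--             return True
--         return False
--
--
--
--     kept = []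
--     i = 0
--     while i < len(phones):
--         ph = phones[i]
--         if not is_vowel(ph):
--             kept.append(ph)
--             i += 1
--         else:
--             # Insert separator if adjacent vowels are found
--             if i > 0 and is_vowel(phones[i - 1]) and insert_vowel_separator(phones, i):
--                 # Continue to next phone after the separator insertion
--                 continue
--             # Keep if initial, final, or has primary stress
--             if i == 0 or i == len(phones) - 1 or "1" in ph:
--                 kept.append(ph[0:2])
--             i += 1
--
--     return " ".join(kept)
-- ===== SOURCE B (Python) =====
-- def remove_vowels_but_keep_main(pron):
--     """
--     Remove vowels unless they are initial, final, or stressed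
--     """
--     pron = pron.replace("ER0", "AH0 R").replace("ER1", "AH1 R").replace("ER2", "AH2 R")
--     pron = pron.replace("Y UW", "UW").replace("Y UH", "UH")
--
--     phones = pron.split()
--
--     vowels = {"AA", "AE", "AH", "AO", "AW", "AY",
--               "EH", "ER", "EY", "IH", "IY",
--               "OW", "OY", "UH", "UW"}
--
--     def is_vowel(phone):
--         return any(phone.startswith(v) for v in vowels)
--
--     def separator(prev):
--         p2 = prev[0:2]
--         if p2 in {"IY", "EY", "AE"}:
--             return "Y"
--         if p2 in {"AA", "AO", "OW", "UW", "AH", "UH"}: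
--             return "W"
--         return None
--
--     # Pass 1: insert Y/W separators between neighbouring vowels (no mutation of phones).
--     expanded = []
--     prev = None
--     for ph in phones:
--         if prev is not None and is_vowel(prev) and is_vowel(ph):
--             s = separator(prev)
--             if s is not None:
--                 expanded.append(s)
--         expanded.append(ph)
--         prev = ph
--
--     # Pass 2: keep non-vowels; keep a vowel's first two chars only if initial, final or stressed.
--     n = len(expanded)
--     kept = []
--     for j, ph in enumerate(expanded):
--         if not is_vowel(ph):
--             kept.append(ph)
--         elif j == 0 or j == n - 1 or "1" in ph:
--             kept.append(ph[0:2])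
--
--     return " ".join(kept)
-- ===== Notes on version B (the rewrite author's own statement) =====
-- stated objective: alternative
-- what changed: Replaced A's single while-loop that mutates the phone list in place (insert + re-index + continue) by two pure passes: pass 1 builds an expanded list with Y/W separators inserted between neighbouring vowels, pass 2 filters it by index (initial/final/stressed vowels kept as their first two chars).
import Mathlib
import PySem

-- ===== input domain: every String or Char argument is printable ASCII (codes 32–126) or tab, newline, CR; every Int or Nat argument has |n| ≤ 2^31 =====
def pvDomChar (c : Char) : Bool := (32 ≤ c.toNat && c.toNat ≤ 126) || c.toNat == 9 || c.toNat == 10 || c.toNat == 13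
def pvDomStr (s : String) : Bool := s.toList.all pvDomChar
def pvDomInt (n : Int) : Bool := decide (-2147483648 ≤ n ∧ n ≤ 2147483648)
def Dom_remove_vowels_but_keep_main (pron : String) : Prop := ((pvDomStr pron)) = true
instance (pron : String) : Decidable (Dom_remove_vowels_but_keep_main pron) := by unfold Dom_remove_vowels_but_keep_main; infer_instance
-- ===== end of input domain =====

-- B replaces A's in-place-mutating while loop (insert + continue + re-indexing) by two pure passes:
-- pass 1 inserts the Y/W separators between neighbouring vowels, pass 2 filters by index; same output.

-- ===== PORT A =====
-- shared preamble of both Pythons: the three ER replaces, the Y UW / Y UH replaces, split(), vowel test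
def pvPre (pron : String) : String :=
  PySem.Str.replace (PySem.Str.replace (PySem.Str.replace (PySem.Str.replace (PySem.Str.replace
    pron "ER0" "AH0 R") "ER1" "AH1 R") "ER2" "AH2 R") "Y UW" "UW") "Y UH" "UH"

def pvVowels : List String :=
  ["AA", "AE", "AH", "AO", "AW", "AY", "EH", "ER", "EY", "IH", "IY", "OW", "OY", "UH", "UW"]

def pvIsVowel (ph : String) : Bool := pvVowels.any (fun v => PySem.Str.startswith ph v)

-- ph[0:2]
def pvSep2 (ph : String) : String := PySem.Str.slice ph (some 0) (some 2)

-- phones[i] (only evaluated under the loop's 0 ≤ i < len guard)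
def pvGetS (phones : List String) (i : Nat) : String := (PySem.List.pyGet? phones (i : Int)).getD ""

-- insert_vowel_separator: returns the mutated list when it inserts, none when it returns False
def pvInsertSep? (phones : List String) (i : Nat) : Option (List String) :=
  if ¬ 0 < i then none
  else
    let starting := pvGetS phones (i - 1)
    let following := pvGetS phones i
    if ¬ (pvIsVowel starting && pvIsVowel following) then none
    else if ["IY", "EY", "AE"].contains (pvSep2 starting) then
      some (PySem.List.insert phones (i : Int) "Y")
    else if ["AA", "AO", "OW", "UW", "AH", "UH"].contains (pvSep2 starting) then
      some (PySem.List.insert phones (i : Int) "W")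
    else none

def pvKeepCond (phones : List String) (i : Nat) (ph : String) : Bool :=
  i == 0 || i == phones.length - 1 || PySem.Str.isIn "1" ph

-- the while loop, fuel-guarded (fuel only makes it total; 3*len+1 is proved sufficient below)
def pvLoopA : Nat → List String → Nat → List String → List String
  | 0, _, _, kept => kept
  | fuel+1, phones, i, kept =>
    if i < phones.length then
      let ph := pvGetS phones i
      if ¬ pvIsVowel ph then pvLoopA fuel phones (i+1) (kept ++ [ph])
      else if 0 < i && pvIsVowel (pvGetS phones (i-1)) then
        match pvInsertSep? phones i with
        | some phones' => pvLoopA fuel phones' i kept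
        | none => pvLoopA fuel phones (i+1) (if pvKeepCond phones i ph then kept ++ [pvSep2 ph] else kept)
      else
        pvLoopA fuel phones (i+1) (if pvKeepCond phones i ph then kept ++ [pvSep2 ph] else kept)
    else kept

def remove_vowels_but_keep_main (pron : String) : String :=
  let phones := PySem.Str.split₀ (pvPre pron)
  PySem.Str.join " " (pvLoopA (3 * phones.length + 1) phones 0 [])

-- ===== PORT B =====
-- separator(prev): the Y/W choice from prev[0:2]
def pvSeparator? (prev : String) : Option String :=
  if ["IY", "EY", "AE"].contains (pvSep2 prev) then some "Y"
  else if ["AA", "AO", "OW", "UW", "AH", "UH"].contains (pvSep2 prev) then some "W"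
  else none

-- what pass 1 appends before ph: the separator when prev and ph are neighbouring vowels and one exists
def pvSepPart (prev : Option String) (ph : String) : List String :=
  match prev with
  | none => []
  | some p => if pvIsVowel p && pvIsVowel ph then (pvSeparator? p).toList else []

-- pass 1: for ph in phones: expanded += sepPart; expanded.append(ph); prev = ph
def pvExpandAux (acc : List String) (prev : Option String) : List String → List String
  | [] => acc
  | ph :: rest => pvExpandAux ((acc ++ pvSepPart prev ph) ++ [ph]) (some ph) rest

-- pass 2: for j, ph in enumerate(expanded): keep non-vowels; keep vowel[0:2] iff j==0, j==n-1 or '1' in ph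
def pvKeptAux (n : Nat) (acc : List String) (j : Nat) : List String → List String
  | [] => acc
  | ph :: rest =>
    pvKeptAux n
      (if ¬ pvIsVowel ph then acc ++ [ph]
       else if j == 0 || j == n - 1 || PySem.Str.isIn "1" ph then acc ++ [pvSep2 ph] else acc)
      (j+1) rest

def remove_vowels_but_keep_main_alt (pron : String) : String :=
  let phones := PySem.Str.split₀ (pvPre pron)
  let expanded := pvExpandAux [] none phones
  PySem.Str.join " " (pvKeptAux expanded.length [] 0 expanded)

-- ===== PRECONDITION & SPEC =====
def Spec_remove_vowels_but_keep_main (pron : String) (out : String) : Prop := out = remove_vowels_but_keep_main_alt pron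
instance (pron : String) (out : String) : Decidable (Spec_remove_vowels_but_keep_main pron out) := by unfold Spec_remove_vowels_but_keep_main; infer_instance

-- ===== CLAIM (what is proved, stated in full; the proofs are below) =====
def Claim_equal_remove_vowels_but_keep_main : Prop := ∀ (pron : String), Dom_remove_vowels_but_keep_main pron → Spec_remove_vowels_but_keep_main pron (remove_vowels_but_keep_main pron)

-- ===== LEMMAS AND PROOFS =====

-- the common description of the kept tokens: one fused left-to-right pass carrying the previous phone
def pvFused (prev : Option String) : List String → List String
  | [] => []
  | ph :: rest =>
    if pvIsVowel ph then
      (pvSepPart prev ph ++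
        (if prev.isNone || rest.isEmpty || PySem.Str.isIn "1" ph then [pvSep2 ph] else [])) ++
      pvFused (some ph) rest
    else ph :: pvFused (some ph) rest

lemma pvGetS_append_cons (pre : List String) (ph : String) (rest : List String) :
    pvGetS (pre ++ ph :: rest) pre.length = ph := by
  simp [pvGetS]

lemma pvGetS_append_last (pre suf : List String) (q : String) (h : pre.getLast? = some q) :
    pvGetS (pre ++ suf) (pre.length - 1) = q := by
  have hne : pre ≠ [] := by rintro rfl; simp at h
  have hl : 0 < pre.length := List.length_pos_of_ne_nil hne
  rw [List.getLast?_eq_getElem?] at h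
  simp only [pvGetS, PySem.List.pyGet?_natCast]
  rw [List.getElem?_append_left (by omega)]
  simp [h]

lemma pvInsert_append_cons (pre : List String) (s ph : String) (rest : List String) :
    PySem.List.insert (pre ++ ph :: rest) (pre.length : Int) s = pre ++ s :: ph :: rest := by
  rw [PySem.List.insert_natCast _ _ _ (by simp)]
  simp [List.take_left', List.drop_left']

lemma pvSeparator?_vals (p s : String) (h : pvSeparator? p = some s) : s = "Y" ∨ s = "W" := by
  unfold pvSeparator? at h
  split_ifs at h <;> simp_all

lemma pvIsVowel_Y : pvIsVowel "Y" = false := by decide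
lemma pvIsVowel_W : pvIsVowel "W" = false := by decide

lemma pvKeepCond_append (pre : List String) (ph : String) (rest : List String) :
    pvKeepCond (pre ++ ph :: rest) pre.length ph
      = ((pre.length == 0) || rest.isEmpty || PySem.Str.isIn "1" ph) := by
  unfold pvKeepCond
  have h2 : (pre.length == (pre ++ ph :: rest).length - 1) = rest.isEmpty := by
    cases rest with
    | nil => simp
    | cons r rs =>
      simp
  rw [h2]

-- the while loop computes the fused pass (fuel 3·|suffix|+1 suffices)
lemma pvLoopA_eq_fused : ∀ (suf pre kept : List String) (fuel : Nat),
    3 * suf.length + 1 ≤ fuel →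
    pvLoopA fuel (pre ++ suf) pre.length kept = kept ++ pvFused pre.getLast? suf := by
  intro suf
  induction suf with
  | nil =>
    intro pre kept fuel hf
    obtain ⟨f, rfl⟩ : ∃ f, fuel = f + 1 := ⟨fuel - 1, by omega⟩
    simp [pvLoopA, pvFused]
  | cons ph rest ih =>
    intro pre kept fuel hf
    simp only [List.length_cons] at hf
    obtain ⟨f, rfl⟩ : ∃ f, fuel = f + 1 := ⟨fuel - 1, by omega⟩
    have hf' : 3 * rest.length + 3 ≤ f := by omega
    have hlt : pre.length < (pre ++ ph :: rest).length := by simp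
    have hget : pvGetS (pre ++ ph :: rest) pre.length = ph := pvGetS_append_cons ..
    have hsplit : pre ++ ph :: rest = (pre ++ [ph]) ++ rest := by simp
    have hlast : (pre ++ [ph]).getLast? = some ph := by simp
    simp only [pvLoopA, if_pos hlt, hget]
    by_cases hv : pvIsVowel ph
    · rw [if_neg (show ¬¬(pvIsVowel ph = true) by simp [hv])]
      cases hq : pre.getLast? with
      | none =>
        have hpre : pre = [] := by simpa using hq
        subst hpre
        rw [if_neg (by simp)]
        rw [pvKeepCond_append, if_pos (by simp)]
        rw [hsplit, show List.length ([] : List String) + 1 = (([] : List String) ++ [ph]).length by simp]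
        rw [ih _ _ f (by omega), hlast]
        simp [pvFused, hv, pvSepPart]
      | some q =>
        have hpre : pre ≠ [] := by intro h; rw [h] at hq; simp at hq
        have hlen0 : 0 < pre.length := List.length_pos_of_ne_nil hpre
        have hgetp : pvGetS (pre ++ ph :: rest) (pre.length - 1) = q :=
          pvGetS_append_last _ _ _ hq
        have hje : (pre.length == 0) = false := by simp; omega
        rw [hgetp]
        by_cases hvq : pvIsVowel q
        · rw [if_pos (by simp [hlen0, hvq])]
          have hins : pvInsertSep? (pre ++ ph :: rest) pre.length
              = (pvSeparator? q).map (fun s => pre ++ s :: ph :: rest) := by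
            simp only [pvInsertSep?, pvSeparator?, hgetp, hget]
            rw [if_neg (by simp [hlen0]), if_neg (by simp [hvq, hv])]
            split_ifs <;> simp [pvInsert_append_cons]
          cases hsep : pvSeparator? q with
          | none =>
            rw [hins, hsep]
            simp only [Option.map_none]
            rw [pvKeepCond_append, hje]
            rw [hsplit, show pre.length + 1 = (pre ++ [ph]).length by simp]
            rw [ih _ _ f (by omega), hlast]
            simp only [pvFused, hv, pvSepPart, hvq, Bool.and_self, hsep,
              Option.toList_none, Option.isNone_some, Bool.false_or]
            split_ifs <;> simp
          | some s =>
            have hvs : pvIsVowel s = false := by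
              rcases pvSeparator?_vals _ _ hsep with rfl | rfl
              · exact pvIsVowel_Y
              · exact pvIsVowel_W
            rw [hins, hsep]
            simp only [Option.map_some]
            -- second iteration: the inserted separator s is consumed
            obtain ⟨f1, rfl⟩ : ∃ f1, f = f1 + 1 := ⟨f - 1, by omega⟩
            have hlt1 : pre.length < (pre ++ s :: ph :: rest).length := by simp
            have hget1 : pvGetS (pre ++ s :: ph :: rest) pre.length = s := pvGetS_append_cons ..
            simp only [pvLoopA, if_pos hlt1, hget1]
            rw [if_pos (show ¬(pvIsVowel s = true) by simp [hvs])]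
            -- third iteration: the vowel ph, now preceded by the non-vowel s
            obtain ⟨f2, rfl⟩ : ∃ f2, f1 = f2 + 1 := ⟨f1 - 1, by omega⟩
            have hre : pre ++ s :: ph :: rest = (pre ++ [s]) ++ ph :: rest := by simp
            have hlt2 : (pre ++ [s]).length < ((pre ++ [s]) ++ ph :: rest).length := by simp
            have hget2 : pvGetS ((pre ++ [s]) ++ ph :: rest) (pre ++ [s]).length = ph :=
              pvGetS_append_cons ..
            have hgetp2 : pvGetS ((pre ++ [s]) ++ ph :: rest) ((pre ++ [s]).length - 1) = s :=
              pvGetS_append_last _ _ _ (by simp)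
            rw [hre, show pre.length + 1 = (pre ++ [s]).length by simp]
            simp only [pvLoopA, if_pos hlt2, hget2]
            rw [if_neg (show ¬¬(pvIsVowel ph = true) by simp [hv])]
            rw [if_neg (by rw [hgetp2]; simp [hvs])]
            rw [pvKeepCond_append, show ((pre ++ [s]).length == 0) = false by simp]
            have hre2 : (pre ++ [s]) ++ ph :: rest = ((pre ++ [s]) ++ [ph]) ++ rest := by simp
            rw [hre2, show (pre ++ [s]).length + 1 = ((pre ++ [s]) ++ [ph]).length by simp]
            rw [ih _ _ f2 (by omega), show ((pre ++ [s]) ++ [ph]).getLast? = some ph by simp]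
            simp only [pvFused, hv, pvSepPart, hvq, Bool.and_self, hsep,
              Option.toList_some, Option.isNone_some, Bool.false_or]
            split_ifs <;> simp
        · rw [if_neg (by simp [hvq])]
          rw [pvKeepCond_append, hje]
          rw [hsplit, show pre.length + 1 = (pre ++ [ph]).length by simp]
          rw [ih _ _ f (by omega), hlast]
          simp only [pvFused, hv, pvSepPart, hvq, Bool.false_and,
            if_neg (show ¬(false = true) by simp), Option.isNone_some, Bool.false_or,
            List.nil_append]
          split_ifs <;> simp
    · rw [if_pos (show ¬(pvIsVowel ph = true) by simp [hv])]
      rw [hsplit, show pre.length + 1 = (pre ++ [ph]).length by simp]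
      rw [ih _ _ f (by omega), hlast]
      simp [pvFused, hv]

-- pass 1 without its accumulator
def pvExpand (prev : Option String) : List String → List String
  | [] => []
  | ph :: rest => (pvSepPart prev ph ++ [ph]) ++ pvExpand (some ph) rest

lemma pvExpandAux_eq : ∀ (l acc : List String) (prev : Option String),
    pvExpandAux acc prev l = acc ++ pvExpand prev l := by
  intro l
  induction l with
  | nil => simp [pvExpandAux, pvExpand]
  | cons ph rest ih => intro acc prev; simp [pvExpandAux, pvExpand, ih]

-- pass 2 without its accumulator
def pvKeep (n j : Nat) : List String → List String
  | [] => []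
  | ph :: rest =>
    (if ¬ pvIsVowel ph then [ph]
     else if j == 0 || j == n - 1 || PySem.Str.isIn "1" ph then [pvSep2 ph] else []) ++
    pvKeep n (j+1) rest

lemma pvKeptAux_eq : ∀ (l : List String) (n : Nat) (acc : List String) (j : Nat),
    pvKeptAux n acc j l = acc ++ pvKeep n j l := by
  intro l
  induction l with
  | nil => simp [pvKeptAux, pvKeep]
  | cons ph rest ih =>
    intro n acc j
    simp only [pvKeptAux, pvKeep, ih]
    split_ifs <;> simp
lemma pvExpand_eq_nil_iff (prev : Option String) (suf : List String) :
    pvExpand prev suf = [] ↔ suf = [] := by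
  cases suf <;> simp [pvExpand]

lemma pvSepPart_facts (p ph s : String) (tl : List String)
    (h : pvSepPart (some p) ph = s :: tl) :
    tl = [] ∧ pvIsVowel ph = true ∧ pvIsVowel s = false := by
  simp only [pvSepPart] at h
  by_cases hvv : pvIsVowel p && pvIsVowel ph
  · rw [if_pos hvv] at h
    cases hs : pvSeparator? p with
    | none => rw [hs] at h; simp at h
    | some s' =>
      rw [hs] at h
      simp only [Option.toList_some, List.cons.injEq] at h
      obtain ⟨h1, rfl⟩ := h
      subst h1
      refine ⟨rfl, Bool.and_elim_right hvv, ?_⟩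
      rcases pvSeparator?_vals _ _ hs with rfl | rfl
      · exact pvIsVowel_Y
      · exact pvIsVowel_W
  · rw [if_neg hvv] at h; simp at h

-- pass 2 applied to pass 1 is the fused pass
lemma pvKeep_expand : ∀ (suf : List String) (prev : Option String) (j n : Nat),
    (prev = none ↔ j = 0) → n = j + (pvExpand prev suf).length →
    pvKeep n j (pvExpand prev suf) = pvFused prev suf := by
  intro suf
  induction suf with
  | nil => intro prev j n _ _; simp [pvExpand, pvKeep, pvFused]
  | cons ph rest ih =>
    intro prev j n hj hn
    rcases hsp : pvSepPart prev ph with _ | ⟨s, tl⟩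
    · -- no separator is inserted before ph
      have hje : (j == 0) = prev.isNone := by
        cases prev with
        | none => simp [hj.mp rfl]
        | some p =>
          have : j ≠ 0 := fun h0 => by simpa using hj.mpr h0
          simp [this]
      have hE : pvExpand prev (ph :: rest) = ph :: pvExpand (some ph) rest := by
        simp [pvExpand, hsp]
      rw [hE] at hn ⊢
      simp only [List.length_cons] at hn
      have hrest : (j == n - 1) = rest.isEmpty := by
        cases rest with
        | nil =>
          simp only [pvExpand, List.length_nil] at hn
          simp [hn]
        | cons r rs =>
          have hne : pvExpand (some ph) (r :: rs) ≠ [] := by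
            simp [pvExpand_eq_nil_iff]
          have hpos : 0 < (pvExpand (some ph) (r :: rs)).length := List.length_pos_of_ne_nil hne
          have : j ≠ n - 1 := by omega
          simp [this]
      simp only [pvKeep, pvFused]
      rw [ih (some ph) (j+1) n (by simp) (by omega)]
      by_cases hv : pvIsVowel ph
      · rw [if_neg (show ¬¬(pvIsVowel ph = true) by simp [hv]), if_pos hv]
        have hcond : (j == 0 || j == n - 1 || PySem.Str.isIn "1" ph)
            = (prev.isNone || rest.isEmpty || PySem.Str.isIn "1" ph) := by
          rw [hje, hrest]
        rw [hcond, hsp]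
        simp
      · rw [if_pos (show ¬(pvIsVowel ph = true) by simp [hv]), if_neg (show ¬(pvIsVowel ph = true) by simp [hv])]
        simp
    · -- a separator s is inserted before the vowel ph
      cases prev with
      | none => simp [pvSepPart] at hsp
      | some p =>
        obtain ⟨rfl, hvph, hvs⟩ := pvSepPart_facts p ph s tl hsp
        have hE : pvExpand (some p) (ph :: rest) = s :: ph :: pvExpand (some ph) rest := by
          simp [pvExpand, hsp]
        rw [hE] at hn ⊢
        simp only [List.length_cons] at hn
        have hrest : (j + 1 == n - 1) = rest.isEmpty := by
          cases rest with
          | nil =>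
            simp only [pvExpand, List.length_nil] at hn
            simp [hn]
          | cons r rs =>
            have hne : pvExpand (some ph) (r :: rs) ≠ [] := by
              simp [pvExpand_eq_nil_iff]
            have hpos : 0 < (pvExpand (some ph) (r :: rs)).length := List.length_pos_of_ne_nil hne
            have : j + 1 ≠ n - 1 := by omega
            simp [this]
        simp only [pvKeep, pvFused]
        rw [ih (some ph) (j+2) n (by simp) (by omega)]
        rw [if_pos (show ¬(pvIsVowel s = true) by simp [hvs]),
          if_neg (show ¬¬(pvIsVowel ph = true) by simp [hvph]), if_pos hvph, hsp]
        have hcond : (j + 1 == 0 || j + 1 == n - 1 || PySem.Str.isIn "1" ph)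
            = ((some p).isNone || rest.isEmpty || PySem.Str.isIn "1" ph) := by
          rw [hrest]
          simp
        rw [hcond]
        simp

-- ===== VERDICT (by name: the statement is the Claim_ definition above) =====
theorem remove_vowels_but_keep_main_spec : Claim_equal_remove_vowels_but_keep_main := by
  intro pron _
  unfold Spec_remove_vowels_but_keep_main remove_vowels_but_keep_main remove_vowels_but_keep_main_alt
  show PySem.Str.join " " (pvLoopA (3 * (PySem.Str.split₀ (pvPre pron)).length + 1) (PySem.Str.split₀ (pvPre pron)) 0 []) = PySem.Str.join " " (pvKeptAux (pvExpandAux [] none (PySem.Str.split₀ (pvPre pron))).length [] 0 (pvExpandAux [] none (PySem.Str.split₀ (pvPre pron))))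
  have hA := pvLoopA_eq_fused (PySem.Str.split₀ (pvPre pron)) [] [] _ (le_refl _)
  simp only [List.nil_append, List.length_nil] at hA
  rw [hA]
  rw [pvExpandAux_eq, pvKeptAux_eq]
  simp only [List.nil_append]
  rw [pvKeep_expand _ none 0 _ (by simp) (by simp)]
  simp
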